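-- pv_equiv track=rewrite | github.com/gozu/dss-admin-toolkit | admin-toolkit/python-lib/compare_registry.py | diff_keyed_tables
-- ===== SOURCE A (Python) =====
-- from typing import Any, Dict, List, Optional, Tuple
--
-- def _row_key(row: Dict[str, Any], key_fields: List[str]) -> tuple:
--     """Extract natural key tuple from a row dict."""
--     return tuple(str(row.get(k, '')) for k in key_fields)
--
-- def diff_keyed_tables(
--     rows1: List[Dict[str, Any]],
--     rows2: List[Dict[str, Any]],
--     key_fields: List[str],
--     columns: List[str],
-- ) -> Dict[str, int]:
--     """Diff two sets of rows by natural keys. Returns summary counts."""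
--     map1 = {_row_key(r, key_fields): r for r in rows1}
--     map2 = {_row_key(r, key_fields): r for r in rows2}
--     keys1 = set(map1.keys())
--     keys2 = set(map2.keys())
--
--     changed = 0
--     unchanged_count = 0
--     value_cols = [c for c in columns if c not in key_fields]
--
--     for k in keys1 & keys2:
--         r1, r2 = map1[k], map2[k]
--         if any(r1.get(c) != r2.get(c) for c in value_cols):
--             changed += 1
--         else:
--             unchanged_count += 1
--
--     return {
--         'added': len(keys1 - keys2),
--         'removed': len(keys2 - keys1),
--         'changed': changed,
--         'unchanged': unchanged_count,
--         'run1Count': len(rows1),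
--         'run2Count': len(rows2),
--     }
-- ===== SOURCE B (Python) =====
-- from typing import Any, Dict, List
--
--
-- def _row_key(row: Dict[str, Any], key_fields: List[str]) -> tuple:
--     return tuple(str(row.get(k, '')) for k in key_fields)
--
--
-- def diff_keyed_tables(
--     rows1: List[Dict[str, Any]],
--     rows2: List[Dict[str, Any]],
--     key_fields: List[str],
--     columns: List[str],
-- ) -> Dict[str, int]:
--     """Sort-merge diff: dedup rows by key (last wins), sort both sides by key,
--     then one two-pointer merge scan classifies every key by comparison alone —
--     no set algebra and no hash lookups."""
--     value_cols = [c for c in columns if c not in key_fields]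
--     items1 = sorted({_row_key(r, key_fields): r for r in rows1}.items(),
--                     key=lambda kv: kv[0])
--     items2 = sorted({_row_key(r, key_fields): r for r in rows2}.items(),
--                     key=lambda kv: kv[0])
--
--     added = removed = changed = unchanged = 0
--     i = j = 0
--     while i < len(items1) and j < len(items2):
--         k1, r1 = items1[i]
--         k2, r2 = items2[j]
--         if k1 < k2:
--             added += 1
--             i += 1
--         elif k2 < k1:
--             removed += 1
--             j += 1
--         else:
--             if any(r1.get(c) != r2.get(c) for c in value_cols):
--                 changed += 1
--             else:
--                 unchanged += 1
--             i += 1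
--             j += 1
--     added += len(items1) - i
--     removed += len(items2) - j
--
--     return {
--         'added': added,
--         'removed': removed,
--         'changed': changed,
--         'unchanged': unchanged,
--         'run1Count': len(rows1),
--         'run2Count': len(rows2),
--     }
-- ===== Notes on version B (the rewrite author's own statement) =====
-- stated objective: alternative
-- what changed: Replaced the hash-join classification (key-set intersection loop plus two set differences with dict lookups) by a sort-merge join: both deduped item lists are sorted by key and one two-pointer merge scan classifies each key as added/removed/changed/unchanged purely by key comparisons, no set algebra or membership lookups.
import Mathlib
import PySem

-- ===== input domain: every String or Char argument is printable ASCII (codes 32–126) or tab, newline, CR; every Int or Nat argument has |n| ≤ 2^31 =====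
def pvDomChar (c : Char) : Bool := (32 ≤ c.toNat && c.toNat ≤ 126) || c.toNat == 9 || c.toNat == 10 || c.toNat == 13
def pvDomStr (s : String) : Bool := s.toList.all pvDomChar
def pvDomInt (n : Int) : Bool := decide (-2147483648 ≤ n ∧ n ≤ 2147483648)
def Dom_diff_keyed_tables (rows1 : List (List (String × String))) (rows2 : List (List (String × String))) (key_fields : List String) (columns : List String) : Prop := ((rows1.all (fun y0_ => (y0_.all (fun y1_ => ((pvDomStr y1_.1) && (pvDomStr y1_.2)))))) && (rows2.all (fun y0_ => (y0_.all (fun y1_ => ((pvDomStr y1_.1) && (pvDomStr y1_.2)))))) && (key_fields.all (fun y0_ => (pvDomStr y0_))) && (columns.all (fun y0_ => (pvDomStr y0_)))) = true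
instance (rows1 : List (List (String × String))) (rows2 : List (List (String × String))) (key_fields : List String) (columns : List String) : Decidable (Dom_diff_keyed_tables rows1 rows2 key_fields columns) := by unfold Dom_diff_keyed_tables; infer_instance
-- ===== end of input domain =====

-- B replaces A's hash-join classification (key-set intersection plus two set differences with
-- dict lookups) by a sort-merge join: dedup as before, sort both item lists by key, then one
-- two-pointer merge scan classifies every key by comparison alone; same return value.

-- ===== PORT A =====

-- _row_key: tuple(str(row.get(k, '')) for k in key_fields); values are strings so str() is identity
def pvRowKey (row : PySem.Dict String String) (key_fields : List String) : List String :=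
  key_fields.map (fun k => row.getD k "")

def pvBuildMap (rows : List (List (String × String))) (key_fields : List String) :
    PySem.Dict (List String) (PySem.Dict String String) :=
  rows.foldl (fun d r => d.insert (pvRowKey (PySem.Dict.ofList r) key_fields) (PySem.Dict.ofList r)) PySem.Dict.empty

def diff_keyed_tables (rows1 : List (List (String × String))) (rows2 : List (List (String × String))) (key_fields : List String) (columns : List String) : List (String × Int) :=
  let map1 := pvBuildMap rows1 key_fields
  let map2 := pvBuildMap rows2 key_fields
  let keys1 : PySem.Set (List String) := PySem.Set.ofList map1.keys
  let keys2 : PySem.Set (List String) := PySem.Set.ofList map2.keys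
  let value_cols := columns.filter (fun c => !(key_fields.contains c))
  -- for k in keys1 & keys2 (counting only, so set iteration order is immaterial);
  -- map1[k]/map2[k] cannot raise since k is in both key sets, so getD's default is never used
  let cu : Int × Int := (PySem.Set.inter keys1 keys2).foldl
    (fun (cu : Int × Int) k =>
      let r1 := map1.getD k PySem.Dict.empty
      let r2 := map2.getD k PySem.Dict.empty
      if value_cols.any (fun c => !(r1.get? c == r2.get? c)) then (cu.1 + 1, cu.2)
      else (cu.1, cu.2 + 1)) (0, 0)
  [("added", ((PySem.Set.diff keys1 keys2).length : Int)),
   ("removed", ((PySem.Set.diff keys2 keys1).length : Int)),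
   ("changed", cu.1),
   ("unchanged", cu.2),
   ("run1Count", (rows1.length : Int)),
   ("run2Count", (rows2.length : Int))]

-- ===== PORT B =====

-- the while loop of Source B: the two pointers i, j become the two list suffixes; the fuel argument
-- (always |l1| + |l2| at the call site, one unit per iteration) only makes the recursion
-- structural, it never runs out; the post-loop 'added += len(items1) - i; removed += len(items2) - j'
-- is the two stop cases. 'k1 < k2' on keys: List String lexicographic order = Python's
-- tuple-of-str '<' on this domain.
def pvMergeLoop (value_cols : List String) :
    Nat → List (List String × PySem.Dict String String) →
    List (List String × PySem.Dict String String) →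
    Int × Int × Int × Int → Int × Int × Int × Int
  | _, l1, [], (a, r, c, u) => (a + l1.length, r, c, u)
  | _, [], l2, (a, r, c, u) => (a, r + l2.length, c, u)
  | 0, l1, l2, (a, r, c, u) => (a + l1.length, r + l2.length, c, u)
  | fuel + 1, (k1, r1) :: t1, (k2, r2) :: t2, (a, r, c, u) =>
    if k1 < k2 then pvMergeLoop value_cols fuel t1 ((k2, r2) :: t2) (a + 1, r, c, u)
    else if k2 < k1 then pvMergeLoop value_cols fuel ((k1, r1) :: t1) t2 (a, r + 1, c, u)
    else if value_cols.any (fun col => !(r1.get? col == r2.get? col)) then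
      pvMergeLoop value_cols fuel t1 t2 (a, r, c + 1, u)
    else pvMergeLoop value_cols fuel t1 t2 (a, r, c, u + 1)

def diff_keyed_tables_alt (rows1 : List (List (String × String))) (rows2 : List (List (String × String))) (key_fields : List String) (columns : List String) : List (String × Int) :=
  let value_cols := columns.filter (fun c => !(key_fields.contains c))
  let items1 := PySem.List.sorted (pvBuildMap rows1 key_fields).items (fun kv => kv.1) false
  let items2 := PySem.List.sorted (pvBuildMap rows2 key_fields).items (fun kv => kv.1) false
  let arcu := pvMergeLoop value_cols (items1.length + items2.length) items1 items2 (0, 0, 0, 0)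
  [("added", arcu.1),
   ("removed", arcu.2.1),
   ("changed", arcu.2.2.1),
   ("unchanged", arcu.2.2.2),
   ("run1Count", (rows1.length : Int)),
   ("run2Count", (rows2.length : Int))]

-- ===== PRECONDITION & SPEC =====
def Spec_diff_keyed_tables (rows1 : List (List (String × String))) (rows2 : List (List (String × String))) (key_fields : List String) (columns : List String) (out : List (String × Int)) : Prop := out = diff_keyed_tables_alt rows1 rows2 key_fields columns
instance (rows1 : List (List (String × String))) (rows2 : List (List (String × String))) (key_fields : List String) (columns : List String) (out : List (String × Int)) : Decidable (Spec_diff_keyed_tables rows1 rows2 key_fields columns out) := by unfold Spec_diff_keyed_tables; infer_instance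

-- ===== CLAIM (what is proved, stated in full; the proofs are below) =====
def Claim_equal_diff_keyed_tables : Prop := ∀ (rows1 : List (List (String × String))) (rows2 : List (List (String × String))) (key_fields : List String) (columns : List String), Dom_diff_keyed_tables rows1 rows2 key_fields columns → Spec_diff_keyed_tables rows1 rows2 key_fields columns (diff_keyed_tables rows1 rows2 key_fields columns)

-- ===== LEMMAS AND PROOFS =====

-- A's two-counter fold over a list equals (filter-length, filter-length)
theorem pv_fold2 (l : List (List String)) (p : List String → Bool) (c u : Int) :
    l.foldl (fun (cu : Int × Int) k => if p k then (cu.1 + 1, cu.2) else (cu.1, cu.2 + 1)) (c, u)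
      = (c + ((l.filter p).length : Int), u + ((l.filter (fun k => !(p k))).length : Int)) := by
  induction l generalizing c u with
  | nil => simp
  | cons x xs ih =>
    by_cases h : p x = true <;> simp [h, ih] <;> ring

theorem pv_nodup_keys (rows : List (List (String × String))) (key_fields : List String) :
    (pvBuildMap rows key_fields).keys.Nodup := by
  unfold pvBuildMap
  exact PySem.Dict.nodup_keys_foldl_insert_key rows
    (fun r => pvRowKey (PySem.Dict.ofList r) key_fields)
    (fun _ r => PySem.Dict.ofList r) PySem.Dict.empty PySem.Dict.nodup_keys_empty

-- B's merge scan over two strictly key-sorted mapped lists, as filter lengths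
theorem pv_merge (vc : List String) (g1 g2 : List String → PySem.Dict String String)
    (fuel : Nat) :
    ∀ (ks1 ks2 : List (List String)) (a r c u : Int),
    ks1.length + ks2.length ≤ fuel →
    ks1.Pairwise (· < ·) → ks2.Pairwise (· < ·) →
    pvMergeLoop vc fuel (ks1.map (fun k => (k, g1 k))) (ks2.map (fun k => (k, g2 k))) (a, r, c, u)
      = (a + ((ks1.filter (fun k => !(ks2.contains k))).length : Int),
         r + ((ks2.filter (fun k => !(ks1.contains k))).length : Int),
         c + ((ks1.filter (fun k => ks2.contains k && vc.any (fun col => !((g1 k).get? col == (g2 k).get? col)))).length : Int),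
         u + ((ks1.filter (fun k => ks2.contains k && !(vc.any (fun col => !((g1 k).get? col == (g2 k).get? col))))).length : Int)) := by
  induction fuel with
  | zero =>
    intro ks1 ks2 a r c u hle h1 h2
    have e1 : ks1 = [] := by cases ks1 <;> simp_all
    have e2 : ks2 = [] := by cases ks2 <;> simp_all
    subst e1; subst e2
    simp [pvMergeLoop]
  | succ n ih =>
    intro ks1 ks2 a r c u hle h1 h2
    cases ks1 with
    | nil =>
      cases ks2 with
      | nil => simp [pvMergeLoop]
      | cons k2 t2 => simp [pvMergeLoop]
    | cons k1 t1 =>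
      cases ks2 with
      | nil => simp [pvMergeLoop]
      | cons k2 t2 =>
        have hlt1 : ∀ x ∈ t1, k1 < x := (List.pairwise_cons.mp h1).1
        have hlt2 : ∀ x ∈ t2, k2 < x := (List.pairwise_cons.mp h2).1
        have ht1 : t1.Pairwise (· < ·) := (List.pairwise_cons.mp h1).2
        have ht2 : t2.Pairwise (· < ·) := (List.pairwise_cons.mp h2).2
        rcases lt_trichotomy k1 k2 with hlt | heq | hgt
        · -- k1 < k2 : k1 only in side 1
          have hk1 : ∀ x ∈ k2 :: t2, k1 < x := by
            intro x hx
            rcases List.mem_cons.mp hx with h | h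
            · exact h ▸ hlt
            · exact hlt.trans (hlt2 x h)
          have hnm : k1 ∉ (k2 :: t2) := fun h => lt_irrefl k1 (hk1 k1 h)
          have hc2 : ((k2 :: t2).contains k1) = false := by
            simpa using hnm
          have hrec := ih t1 (k2 :: t2) (a + 1) r c u (by simp only [List.length_cons] at hle ⊢; omega) ht1 h2
          simp only [List.map_cons] at hrec
          have eR : (k2 :: t2).filter (fun k => !((k1 :: t1).contains k))
              = (k2 :: t2).filter (fun k => !(t1.contains k)) := by
            apply List.filter_congr
            intro x hx
            have hne : x ≠ k1 := fun h => absurd (h ▸ hk1 x hx) (lt_irrefl x)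
            simp [hne]
          simp only [List.map_cons, pvMergeLoop, if_pos hlt]
          rw [hrec, eR]
          simp only [List.filter_cons, hc2, Bool.not_false, Bool.false_and, if_true,
            List.length_cons, Prod.mk.injEq]
          push_cast; and_intros <;> first | rfl | trivial | omega
        · -- equal keys
          subst heq
          have hnmem2 : k1 ∉ t2 := fun h => lt_irrefl k1 (hlt2 k1 h)
          have hcontK : ((k1 :: t2).contains k1) = true := by simp
          have hcontK1 : ((k1 :: t1).contains k1) = true := by simp
          have hmem2f : (t2.contains k1) = false := by simpa using hnmem2
          have eA : (k1 :: t1).filter (fun k => !((k1 :: t2).contains k))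
              = t1.filter (fun k => !(t2.contains k)) := by
            rw [List.filter_cons]
            simp only [hcontK, Bool.not_true]
            apply List.filter_congr
            intro x hx
            have hne : x ≠ k1 := fun h => absurd (h ▸ hlt1 x hx) (lt_irrefl x)
            simp [hne]
          have eR : (k1 :: t2).filter (fun k => !((k1 :: t1).contains k))
              = t2.filter (fun k => !(t1.contains k)) := by
            rw [List.filter_cons]
            simp only [hcontK1, Bool.not_true]
            apply List.filter_congr
            intro x hx
            have hne : x ≠ k1 := fun h => absurd (h ▸ hlt2 x hx) (lt_irrefl x)
            simp [hne]
          have eC : ∀ (q : List String → Bool),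
              (k1 :: t1).filter (fun k => (k1 :: t2).contains k && q k)
              = (if q k1 then k1 :: t1.filter (fun k => t2.contains k && q k)
                 else t1.filter (fun k => t2.contains k && q k)) := by
            intro q
            rw [List.filter_cons]
            simp only [hcontK, Bool.true_and]
            have etail : t1.filter (fun k => (k1 :: t2).contains k && q k)
                = t1.filter (fun k => t2.contains k && q k) := by
              apply List.filter_congr
              intro x hx
              have hne : x ≠ k1 := fun h => absurd (h ▸ hlt1 x hx) (lt_irrefl x)
              simp [hne]
            rw [etail]
          have hrecC := ih t1 t2 a r (c + 1) u (by simp only [List.length_cons] at hle ⊢; omega) ht1 ht2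
          have hrecU := ih t1 t2 a r c (u + 1) (by simp only [List.length_cons] at hle ⊢; omega) ht1 ht2
          simp only [List.map_cons, pvMergeLoop, if_neg (lt_irrefl k1)]
          by_cases hp : (vc.any (fun col => !((g1 k1).get? col == (g2 k1).get? col))) = true
          · rw [if_pos hp, hrecC, eA, eR, eC, eC]
            simp only [hp, Bool.not_true, if_true, List.length_cons, Prod.mk.injEq]
            push_cast; and_intros <;> first | rfl | trivial | omega
          · rw [if_neg hp, hrecU, eA, eR, eC, eC]
            simp only [hp, Bool.not_false, if_true, List.length_cons, Prod.mk.injEq]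
            push_cast; and_intros <;> first | rfl | trivial | omega
        · -- k2 < k1 : k2 only in side 2
          have hk2 : ∀ x ∈ k1 :: t1, k2 < x := by
            intro x hx
            rcases List.mem_cons.mp hx with h | h
            · exact h ▸ hgt
            · exact hgt.trans (hlt1 x h)
          have hnm : k2 ∉ (k1 :: t1) := fun h => lt_irrefl k2 (hk2 k2 h)
          have hc1 : ((k1 :: t1).contains k2) = false := by simpa using hnm
          have hrec := ih (k1 :: t1) t2 a (r + 1) c u (by simp only [List.length_cons] at hle ⊢; omega) h1 ht2
          simp only [List.map_cons] at hrec
          have eA : (k1 :: t1).filter (fun k => !((k2 :: t2).contains k))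
              = (k1 :: t1).filter (fun k => !(t2.contains k)) := by
            apply List.filter_congr
            intro x hx
            have hne : x ≠ k2 := fun h => absurd (h ▸ hk2 x hx) (lt_irrefl x)
            simp [hne]
          have eCq : ∀ (q : List String → Bool),
              (k1 :: t1).filter (fun k => (k2 :: t2).contains k && q k)
              = (k1 :: t1).filter (fun k => t2.contains k && q k) := by
            intro q
            apply List.filter_congr
            intro x hx
            have hne : x ≠ k2 := fun h => absurd (h ▸ hk2 x hx) (lt_irrefl x)
            simp [hne]
          have hnlt : ¬ k1 < k2 := fun h => absurd (h.trans hgt) (lt_irrefl k1)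
          simp only [List.map_cons, pvMergeLoop, if_neg hnlt, if_pos hgt]
          rw [hrec, eA, eCq, eCq]
          simp only [List.filter_cons, hc1, Bool.not_false, if_true, List.length_cons,
            Prod.mk.injEq]
          push_cast; and_intros <;> first | rfl | trivial | omega

-- sorted's result depends on the order only through decide(<): instance choice is irrelevant
theorem pv_sorted_inst {α : Type} (lt : LT (List String)) (dlt : DecidableLT (List String))
    (xs : List α) (key : α → List String)
    (h : ∀ a b : List String, (@LT.lt _ lt a b) ↔ (@LT.lt _ List.instLinearOrder.toLT a b)) :
    @PySem.List.sorted α (List String) lt dlt xs key false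
      = @PySem.List.sorted α (List String) List.instLinearOrder.toLT
          List.instLinearOrder.toDecidableLT xs key false := by
  rw [PySem.List.sorted_eq_foldl_insertBy]
  congr 1
  funext acc x
  congr 1
  funext a b
  exact decide_eq_decide.mpr (h (key a) (key b))

-- the sorted key list of a dict is strictly increasing
theorem pv_sorted_keys_lt (m : PySem.Dict (List String) (PySem.Dict String String))
    (hnd : m.keys.Nodup) :
    (PySem.List.sorted m.keys (fun k => k) false).Pairwise (· < ·) := by
  have hperm := PySem.List.sorted_perm m.keys (fun k : List String => k) false
  have hndS : (PySem.List.sorted m.keys (fun k => k) false).Nodup := hperm.nodup_iff.mpr hnd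
  have hple := PySem.List.sorted_pairwise m.keys (fun k : List String => k)
  rw [pv_sorted_inst _ _ _ _ (fun a b => Iff.rfl)] at hndS ⊢
  exact (hple.and hndS).imp (fun h => lt_of_le_of_ne h.1 h.2)

-- sorted(map.items(), key=fst) = the sorted key list, paired with each key's value
theorem pv_sorted_items (m : PySem.Dict (List String) (PySem.Dict String String))
    (hnd : m.keys.Nodup) :
    PySem.List.sorted m.items (fun kv => kv.1) false
      = (PySem.List.sorted m.keys (fun k => k) false).map
          (fun k => (k, m.getD k PySem.Dict.empty)) := by
  have hperm := PySem.List.sorted_perm m.keys (fun k : List String => k) false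
  have hplt := pv_sorted_keys_lt m hnd
  have hitems : m.items = m.keys.map (fun k => (k, m.getD k PySem.Dict.empty)) :=
    PySem.Dict.items_eq_map_keys m hnd PySem.Dict.empty
  rw [pv_sorted_inst _ _ m.items _ (fun a b => Iff.rfl),
      pv_sorted_inst _ _ m.keys _ (fun a b => Iff.rfl)]
  rw [pv_sorted_inst _ _ m.keys _ (fun a b => Iff.rfl)] at hperm hplt
  apply PySem.List.sorted_eq_of_perm_of_pairwise_lt
  · rw [hitems]
    exact hperm.map _
  · rw [List.pairwise_map]
    exact hplt

theorem pv_main (rows1 rows2 : List (List (String × String))) (key_fields columns : List String) :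
    diff_keyed_tables rows1 rows2 key_fields columns = diff_keyed_tables_alt rows1 rows2 key_fields columns := by
  unfold diff_keyed_tables diff_keyed_tables_alt
  have h1 := pv_nodup_keys rows1 key_fields
  have h2 := pv_nodup_keys rows2 key_fields
  set m1 := pvBuildMap rows1 key_fields with hm1
  set m2 := pvBuildMap rows2 key_fields with hm2
  set vc := columns.filter (fun c => !(key_fields.contains c)) with hvc
  set S1 := PySem.List.sorted m1.keys (fun k => k) false with hS1
  set S2 := PySem.List.sorted m2.keys (fun k => k) false with hS2
  have hperm1 : S1.Perm m1.keys := PySem.List.sorted_perm m1.keys (fun k => k) false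
  have hperm2 : S2.Perm m2.keys := PySem.List.sorted_perm m2.keys (fun k => k) false
  have hplt1 := pv_sorted_keys_lt m1 h1
  have hplt2 := pv_sorted_keys_lt m2 h2
  -- B side: sorted item lists are the sorted key lists paired with the dict values
  rw [pv_sorted_items m1 h1, pv_sorted_items m2 h2]
  simp only [List.length_map]
  rw [pv_merge vc (fun k => m1.getD k PySem.Dict.empty) (fun k => m2.getD k PySem.Dict.empty)
        (S1.length + S2.length) S1 S2 0 0 0 0 le_rfl hplt1 hplt2]
  -- A side: set algebra as filters over the key lists
  simp only [PySem.Set.ofList_eq_self_of_nodup _ h1, PySem.Set.ofList_eq_self_of_nodup _ h2,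
    PySem.Set.inter, PySem.Set.diff, PySem.Set.contains_eq_listContains]
  rw [pv_fold2 (List.filter (fun k => m2.keys.contains k) m1.keys)
        (fun k => vc.any (fun c => !((m1.getD k PySem.Dict.empty).get? c == (m2.getD k PySem.Dict.empty).get? c))) 0 0]
  -- transfer the B-side counts from the sorted key lists to the original key lists
  have hSK1 : ∀ x, S1.contains x = m1.keys.contains x := fun x => by
    simp only [List.contains_eq_mem]
    exact decide_eq_decide.mpr hperm1.mem_iff
  have hSK2 : ∀ x, S2.contains x = m2.keys.contains x := fun x => by
    simp only [List.contains_eq_mem]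
    exact decide_eq_decide.mpr hperm2.mem_iff
  have eFilter : ∀ (p : List String → Bool),
      (S1.filter p).length = ((m1.keys.filter p)).length :=
    fun p => (hperm1.filter p).length_eq
  have eFilter2 : ∀ (p : List String → Bool),
      (S2.filter p).length = ((m2.keys.filter p)).length :=
    fun p => (hperm2.filter p).length_eq
  have eAdd : (S1.filter (fun k => !(S2.contains k))).length
      = (m1.keys.filter (fun k => !(m2.keys.contains k))).length := by
    have : (fun k => !(S2.contains k)) = (fun k => !(m2.keys.contains k)) :=
      funext (fun k => by rw [hSK2])
    rw [this]; exact eFilter _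
  have eRem : (S2.filter (fun k => !(S1.contains k))).length
      = (m2.keys.filter (fun k => !(m1.keys.contains k))).length := by
    have : (fun k => !(S1.contains k)) = (fun k => !(m1.keys.contains k)) :=
      funext (fun k => by rw [hSK1])
    rw [this]; exact eFilter2 _
  have eCh : ∀ (q : List String → Bool),
      (S1.filter (fun k => S2.contains k && q k)).length
      = (m1.keys.filter (fun k => m2.keys.contains k && q k)).length := by
    intro q
    have : (fun k => S2.contains k && q k) = (fun k => m2.keys.contains k && q k) :=
      funext (fun k => by rw [hSK2])
    rw [this]; exact eFilter _
  rw [eAdd, eRem, eCh, eCh]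
  simp only [List.filter_filter, Prod.mk.injEq, List.cons.injEq, and_true, true_and, zero_add]
  and_intros <;>
    first
      | rfl
      | (refine congrArg _ (congrArg _ ?_)
         apply List.filter_congr
         intro x hx
         rw [Bool.and_comm])

-- ===== VERDICT (by name: the statement is the Claim_ definition above) =====
theorem diff_keyed_tables_spec : Claim_equal_diff_keyed_tables := by
  intro rows1 rows2 key_fields columns _
  unfold Spec_diff_keyed_tables
  exact pv_main rows1 rows2 key_fields columns
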